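-- pv_equiv track=rewrite | github.com/baudren/advent-of-code | 2023/day13.py | find_row_symmetry
-- ===== SOURCE A (Python) =====
-- def find_row_symmetry(pattern, already=0):
--     match = True
--     cols = []
--
--     for row in range(1,len(pattern)):
--         # try each column
--         match = True
--         for col in range(len(pattern[0])):
--             start = "".join([e[col] for e in pattern][row-1::-1])
--             end = "".join([e[col] for e in pattern][row:])
--             if len(start) < len(end):
--                 if not end.startswith(start):
--                     match = False
--                     break
--             else:
--                 if not start.startswith(end):
--                     match = False
--                     break
--         if not already and match:
--             break
--         if match and row != already:
--             break
--     return row if match else 0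
-- ===== SOURCE B (Python) =====
-- def find_row_symmetry(pattern, already=0):
--     match = True
--     for row in range(1, len(pattern)):
--         width = len(pattern[0])
--         match = True
--         for k in range(min(row, len(pattern) - row)):
--             if pattern[row - 1 - k][:width] != pattern[row + k][:width]:
--                 match = False
--                 break
--         if not already and match:
--             break
--         if match and row != already:
--             break
--     return row if match else 0
-- ===== Notes on version B (the rewrite author's own statement) =====
-- stated objective: faster
-- what changed: Instead of rebuilding every column as a string (two list comprehensions, a slice, a join and a startswith per column) for each candidate row, B checks the reflection directly by comparing row pairs pattern[row-1-k][:width] == pattern[row+k][:width] (width = len(pattern[0]), the grid width A reads) for k up to min(row, len(pattern)-row), keeping the outer candidate loop and the already/break/return logic identical.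
-- outside the precondition, e.g. on find_row_symmetry(['aac', 'abc', 'ac'], 0): A returns 0, B returns 0
import Mathlib
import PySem

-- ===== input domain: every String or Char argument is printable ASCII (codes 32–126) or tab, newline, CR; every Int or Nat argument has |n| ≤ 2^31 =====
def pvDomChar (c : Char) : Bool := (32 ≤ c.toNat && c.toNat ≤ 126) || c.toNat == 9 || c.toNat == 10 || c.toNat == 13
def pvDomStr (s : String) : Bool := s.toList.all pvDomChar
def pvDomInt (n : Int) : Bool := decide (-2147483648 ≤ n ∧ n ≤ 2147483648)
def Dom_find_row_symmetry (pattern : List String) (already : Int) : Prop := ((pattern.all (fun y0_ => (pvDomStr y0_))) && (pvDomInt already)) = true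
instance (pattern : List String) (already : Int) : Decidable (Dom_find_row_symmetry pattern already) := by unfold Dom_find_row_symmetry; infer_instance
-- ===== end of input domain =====

-- B replaces A's per-column string reconstruction (column comprehension + slice + join + startswith
-- per column) by direct row-pair comparisons pattern[row-1-k][:width] == pattern[row+k][:width]
-- (width = len(pattern[0]), the grid width A reads); same candidate scan and already/break/return
-- logic; objective: faster (measured).


-- ===== PORT A =====
-- inner 'for col in range(len(pattern[0]))' loop; none = the Python raises (IndexError on a ragged grid)
def pvAInner (pattern : List String) (row : Int) : List Int → Option Bool
  | [] => some true
  | col :: cols =>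
    match pattern.mapM (fun e => PySem.Str.pyGet? e col) with
    | none => none
    | some colChars =>
      match PySem.List.slice? colChars (some (row - 1)) none (-1) with
      | none => none
      | some start =>
        let stop := PySem.List.slice colChars (some row) none
        if start.length < stop.length then
          if !(PySem.Chars.startswith stop start) then some false else pvAInner pattern row cols
        else
          if !(PySem.Chars.startswith start stop) then some false else pvAInner pattern row cols

-- outer 'for row in range(1, len(pattern))' loop, carrying the leaked (row, match) pair
def pvAOuter (pattern : List String) (already : Int) : List Int → Int → Bool → Option (Int × Bool)
  | [], row, m => some (row, m)
  | r :: rs, _, _ =>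
    match pvAInner pattern r (PySem.List.pyRange 0 (PySem.Str.len (PySem.List.pyGetD pattern 0 "")) 1) with
    | none => none
    | some m =>
      if already == 0 && m then some (r, m)
      else if m && r != already then some (r, m)
      else pvAOuter pattern already rs r m

def find_row_symmetry (pattern : List String) (already : Int) : Int :=
  match pvAOuter pattern already (PySem.List.pyRange 1 (PySem.List.len pattern) 1) 0 true with
  | none => 0  -- the Python raises here; excluded by Pre_
  | some (row, m) => if m then row else 0

-- ===== PORT B =====
-- inner 'for k in range(min(row, len(pattern) - row))' loop of B (indices always in range)
def pvBInner (pattern : List String) (row w : Int) : List Int → Bool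
  | [] => true
  | k :: ks =>
    if PySem.Str.slice (PySem.List.pyGetD pattern (row - 1 - k) "") none (some w)
        != PySem.Str.slice (PySem.List.pyGetD pattern (row + k) "") none (some w) then false
    else pvBInner pattern row w ks

def pvBOuter (pattern : List String) (already : Int) : List Int → Int → Bool → Int × Bool
  | [], row, m => (row, m)
  | r :: rs, _, _ =>
    let w := PySem.Str.len (PySem.List.pyGetD pattern 0 "")
    let m := pvBInner pattern r w (PySem.List.pyRange 0 (min r (PySem.List.len pattern - r)) 1)
    if already == 0 && m then (r, m)
    else if m && r != already then (r, m)
    else pvBOuter pattern already rs r m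

def find_row_symmetry_alt (pattern : List String) (already : Int) : Int :=
  match pvBOuter pattern already (PySem.List.pyRange 1 (PySem.List.len pattern) 1) 0 true with
  | (row, m) => if m then row else 0

-- ===== PRECONDITION & SPEC =====
-- Pre_: at least two rows (on fewer A raises NameError: row unbound), and either no row shorter than
-- the first row, or all rows nonempty with every candidate reflection already refuted in column 0
-- (then A breaks off each scan at column 0 and returns 0 without reaching any short row). On the
-- remaining ragged grids A may raise IndexError mid-scan, depending on where the scan breaks off;
-- where it happens to return before reaching a short row, B agrees with it anyway.
def Pre_find_row_symmetry (pattern : List String) (already : Int) : Prop :=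
  2 ≤ pattern.length ∧
    ((∀ s ∈ pattern, (pattern.headD "").toList.length ≤ s.toList.length) ∨
     ((∀ s ∈ pattern, 1 ≤ s.toList.length) ∧
      ∀ r < pattern.length, 1 ≤ r → ∃ k < min r (pattern.length - r),
        (pattern.getD (r - 1 - k) "").toList.getD 0 ' ' ≠ (pattern.getD (r + k) "").toList.getD 0 ' '))
instance (pattern : List String) (already : Int) : Decidable (Pre_find_row_symmetry pattern already) := by unfold Pre_find_row_symmetry; infer_instance

def pvWitness_find_row_symmetry : List String × Int := (["#.", "#."], 0)

def Spec_find_row_symmetry (pattern : List String) (already : Int) (out : Int) : Prop := out = find_row_symmetry_alt pattern already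
instance (pattern : List String) (already : Int) (out : Int) : Decidable (Spec_find_row_symmetry pattern already out) := by unfold Spec_find_row_symmetry; infer_instance

-- ===== CLAIM (what is proved, stated in full; the proofs are below) =====
def Claim_equal_find_row_symmetry : Prop := ∀ (pattern : List String) (already : Int), Dom_find_row_symmetry pattern already → Pre_find_row_symmetry pattern already → Spec_find_row_symmetry pattern already (find_row_symmetry pattern already)

-- ===== LEMMAS AND PROOFS =====

-- mapM over Option succeeds pointwise
lemma pv_mapM_some {α β : Type} (g : α → Option β) (f : α → β) :
    ∀ (xs : List α), (∀ e ∈ xs, g e = some (f e)) → xs.mapM g = some (xs.map f) := by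
  intro xs
  induction xs with
  | nil => intro _; rfl
  | cons x xs ih =>
    intro h
    rw [List.mapM_cons, h x (by simp), ih (fun e he => h e (by simp [he]))]
    rfl

-- xs[a::-1] for 0 ≤ a < len xs
lemma pv_slice_from_neg_one {α : Type} (xs : List α) (a : Nat) (h : a < xs.length) :
    PySem.List.slice? xs (some (a : Int)) none (-1) = some ((xs.take (a + 1)).reverse) := by
  rw [PySem.List.slice?, if_neg (by norm_num)]
  simp only [PySem.List.sliceIndices]
  norm_num
  rw [if_neg (by omega : ¬ ((a:Int) < 0))]
  rw [show min (a:Int) ((xs.length:Int) - 1) = (a:Int) by omega]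
  rw [if_pos (by omega : (-1:Int) < (a:Int))]
  rw [show ((a:Int) + 1).toNat = a + 1 by omega]
  have hd : 0 < xs.length := by omega
  have hcg : ∀ x ∈ List.range (a+1),
      xs[((a:Int) + -(x:Int)).toNat]? = some (xs.getD (a - x) (xs[0]'hd)) := by
    intro x hx
    rw [List.mem_range] at hx
    rw [show ((a:Int) + -(x:Int)).toNat = a - x by omega,
      List.getElem?_eq_getElem (by omega), List.getD_eq_getElem _ _ (by omega)]
  rw [List.filterMap_congr hcg]
  rw [show (fun x => some (xs.getD (a - x) (xs[0]'hd))) = some ∘ (fun x => xs.getD (a - x) (xs[0]'hd)) from rfl]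
  rw [List.filterMap_eq_map]
  apply List.ext_getElem (by simp; omega)
  intro i h1 h2
  simp only [List.getElem_map, List.getElem_range, List.getElem_reverse, List.getElem_take,
    List.length_take, List.length_reverse, List.length_map, List.length_range] at h1 h2 ⊢
  rw [List.getD_eq_getElem _ _ (by omega)]
  congr 1
  omega

-- the two-sided startswith test of A is agreement on the overlap
lemma pv_startswith_min (u v : List Char) :
    (if u.length < v.length then PySem.Chars.startswith v u else PySem.Chars.startswith u v)
      = decide (∀ k, k < min u.length v.length → u.getD k ' ' = v.getD k ' ') := by
  have key : ∀ (p s : List Char), p.length ≤ s.length →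
      p.isPrefixOf s = decide (∀ k, k < min p.length s.length → p.getD k ' ' = s.getD k ' ') := by
    intro p s hle
    have hmin : min p.length s.length = p.length := by omega
    rw [hmin, Bool.eq_iff_iff, List.isPrefixOf_iff_prefix, decide_eq_true_iff,
      List.prefix_iff_eq_take]
    constructor
    · intro hb k hk
      have hks : k < s.length := by omega
      have h2 : p.getD k ' ' = (s.take p.length).getD k ' ' := by rw [← hb]
      rw [h2, List.getD_eq_getElem _ _ (by simp; omega), List.getElem_take,
        List.getD_eq_getElem _ _ hks]
    · intro hall
      apply List.ext_getElem (by simp; omega)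
      intro i h1 h2
      have hi : i < p.length := h1
      have := hall i hi
      simpa [List.getD_eq_getElem, hi, List.getElem_take, show i < s.length by omega] using this
  split_ifs with h
  · rw [show PySem.Chars.startswith v u = u.isPrefixOf v from rfl, key u v (by omega)]
  · rw [show PySem.Chars.startswith u v = v.isPrefixOf u from rfl, key v u (by omega),
      decide_eq_decide]
    constructor <;> intro hall k hk <;> exact (hall k (by omega)).symm

lemma pv_rev_take_getD {α : Type} (l : List α) (t k : Nat) (d : α) (ht : t ≤ l.length) (hk : k < t) :
    ((l.take t).reverse).getD k d = l.getD (t - 1 - k) d := by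
  rw [List.getD_eq_getElem _ _ (by simp; omega), List.getD_eq_getElem _ _ (by omega)]
  simp only [List.getElem_reverse, List.getElem_take, List.length_take]
  congr 1
  omega

lemma pv_drop_getD {α : Type} (l : List α) (t k : Nat) (d : α) (hk : t + k < l.length) :
    ((l.drop t)).getD k d = l.getD (t + k) d := by
  rw [List.getD_eq_getElem _ _ (by simp; omega), List.getD_eq_getElem _ _ (by omega)]
  simp [List.getElem_drop]

-- the per-column check of A at column c, as a predicate on row pairs
def pvColB (pattern : List String) (r : Int) (c : Int) : Bool :=
  decide (∀ k : Nat, k < min r.toNat (pattern.length - r.toNat) →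
    (pattern.getD (r.toNat - 1 - k) "").toList.getD c.toNat ' '
      = (pattern.getD (r.toNat + k) "").toList.getD c.toNat ' ')

-- one step of A's inner loop, at a column every row covers
lemma pvAInner_cons (pattern : List String) (r c : Int) (cols : List Int)
    (hc0 : 0 ≤ c) (hclt : ∀ e ∈ pattern, c < (e.toList.length : Int))
    (h1 : 1 ≤ r) (h2 : r < pattern.length) :
    pvAInner pattern r (c :: cols)
      = if pvColB pattern r c then pvAInner pattern r cols else some false := by
  have hn0 : pattern ≠ [] := by intro hp; rw [hp] at h2; simp at h2; omega
  have hmap : pattern.mapM (fun e => PySem.Str.pyGet? e c)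
      = some (pattern.map (fun e => e.toList.getD c.toNat ' ')) := by
    apply pv_mapM_some
    intro e he
    have hlen := hclt e he
    have : PySem.Str.pyGet? e c = PySem.List.pyGet? e.toList c := rfl
    rw [this, PySem.List.pyGet?_eq_some_getElem e.toList hc0 (by omega),
      List.getD_eq_getElem _ _ (by omega)]
  rw [pvAInner, hmap]
  dsimp only
  set colChars := pattern.map (fun e => e.toList.getD c.toNat ' ') with hcc
  have hlenc : colChars.length = pattern.length := by simp [hcc]
  have hsl : PySem.List.slice? colChars (some (r - 1)) none (-1)
      = some ((colChars.take r.toNat).reverse) := by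
    rw [show (r - 1) = ((r.toNat - 1 : Nat) : Int) by omega,
      pv_slice_from_neg_one colChars (r.toNat - 1) (by omega),
      show r.toNat - 1 + 1 = r.toNat by omega]
  rw [hsl]
  dsimp only
  rw [PySem.List.slice_from colChars (by omega : (0:Int) ≤ r)]
  have hlstart : ((colChars.take r.toNat).reverse).length = r.toNat := by
    simp [hlenc]; omega
  have hlstop : (colChars.drop r.toNat).length = pattern.length - r.toNat := by
    simp [hlenc]
  have hcond := pv_startswith_min ((colChars.take r.toNat).reverse) (colChars.drop r.toNat)
  have hdec : decide (∀ k, k < min ((colChars.take r.toNat).reverse).length (colChars.drop r.toNat).length →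
      ((colChars.take r.toNat).reverse).getD k ' ' = (colChars.drop r.toNat).getD k ' ')
      = pvColB pattern r c := by
    rw [pvColB, decide_eq_decide, hlstart, hlstop]
    apply forall_congr'
    intro k
    by_cases hk : k < min r.toNat (pattern.length - r.toNat)
    · have hi1 : r.toNat - 1 - k < pattern.length := by omega
      have hi2 : r.toNat + k < pattern.length := by omega
      have hcol : ∀ i, i < pattern.length →
          colChars.getD i ' ' = (pattern.getD i "").toList.getD c.toNat ' ' := by
        intro i hi
        rw [List.getD_eq_getElem _ _ (by omega : i < colChars.length),
          List.getD_eq_getElem _ _ hi]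
        simp only [hcc, List.getElem_map]
      have e1 : ((colChars.take r.toNat).reverse).getD k ' '
          = (pattern.getD (r.toNat - 1 - k) "").toList.getD c.toNat ' ' := by
        rw [pv_rev_take_getD colChars r.toNat k ' ' (by omega) (by omega), hcol _ hi1]
      have e2 : ((colChars.drop r.toNat)).getD k ' '
          = (pattern.getD (r.toNat + k) "").toList.getD c.toNat ' ' := by
        rw [pv_drop_getD colChars r.toNat k ' ' (by omega), hcol _ hi2]
      rw [e1, e2]
    · simp [hk]
  by_cases hlt : ((colChars.take r.toNat).reverse).length < (colChars.drop r.toNat).length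
  · rw [if_pos hlt]
    rw [if_pos hlt, hdec] at hcond
    cases hval : pvColB pattern r c <;> rw [hval] at hcond
    · simp only [hcond, Bool.not_false, if_true, Bool.false_eq_true, if_false]
    · simp only [hcond, Bool.not_true, Bool.false_eq_true, if_false, if_true]
  · rw [if_neg hlt]
    rw [if_neg hlt, hdec] at hcond
    cases hval : pvColB pattern r c <;> rw [hval] at hcond
    · simp only [hcond, Bool.not_false, if_true, Bool.false_eq_true, if_false]
    · simp only [hcond, Bool.not_true, Bool.false_eq_true, if_false, if_true]

-- A's inner loop is an 'all' over the columns
lemma pvAInner_eq_all (pattern : List String) (r : Int)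
    (h1 : 1 ≤ r) (h2 : r < pattern.length) :
    ∀ cols : List Int, (∀ c ∈ cols, 0 ≤ c ∧ ∀ e ∈ pattern, c < (e.toList.length : Int)) →
      pvAInner pattern r cols = some (cols.all (pvColB pattern r)) := by
  intro cols
  induction cols with
  | nil => intro _; rfl
  | cons c cols ih =>
    intro hmem
    obtain ⟨hc0, hclt⟩ := hmem c (by simp)
    rw [pvAInner_cons pattern r c cols hc0 hclt h1 h2, List.all_cons]
    cases hval : pvColB pattern r c
    · simp only [Bool.false_eq_true, if_false, Bool.false_and]
    · simp only [if_true, Bool.true_and]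
      exact ih (fun d hd => hmem d (List.mem_cons_of_mem _ hd))

-- B's inner loop is an 'all' over the pair offsets
lemma pvBInner_eq_all (pattern : List String) (row w : Int) (ks : List Int) :
    pvBInner pattern row w ks
      = ks.all (fun k => PySem.Str.slice (PySem.List.pyGetD pattern (row - 1 - k) "") none (some w)
          == PySem.Str.slice (PySem.List.pyGetD pattern (row + k) "") none (some w)) := by
  induction ks with
  | nil => rfl
  | cons k ks ih =>
    rw [pvBInner, List.all_cons, ih]
    cases hb : (PySem.Str.slice (PySem.List.pyGetD pattern (row - 1 - k) "") none (some w)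
        == PySem.Str.slice (PySem.List.pyGetD pattern (row + k) "") none (some w)) <;>
      simp only [bne, hb, Bool.not_false, Bool.not_true, if_true, Bool.false_and, Bool.true_and,
        Bool.false_eq_true, if_false]

-- the candidate-row check of A equals the candidate-row check of B, when no row is shorter than row 0
lemma pv_inner_eq (pattern : List String) (r : Int)
    (hwide : ∀ s ∈ pattern, (pattern.headD "").toList.length ≤ s.toList.length)
    (h1 : 1 ≤ r) (h2 : r < pattern.length) :
    pvAInner pattern r (PySem.List.pyRange 0 (PySem.Str.len (PySem.List.pyGetD pattern 0 "")) 1)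
      = some (pvBInner pattern r (PySem.Str.len (PySem.List.pyGetD pattern 0 ""))
          (PySem.List.pyRange 0 (min r (PySem.List.len pattern - r)) 1)) := by
  have hn0 : pattern ≠ [] := by intro hp; rw [hp] at h2; simp at h2; omega
  have hhead : PySem.List.pyGetD pattern 0 "" = pattern.headD "" := by
    rw [PySem.List.pyGetD_zero]
    cases pattern with
    | nil => rfl
    | cons x xs => rfl
  have hw : PySem.Str.len (PySem.List.pyGetD pattern 0 "") = (((pattern.headD "").toList.length : Nat) : Int) := by
    rw [hhead]; rfl
  rw [hw]
  rw [pvAInner_eq_all pattern r h1 h2 _ (by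
    intro c hc
    obtain ⟨hcl, hcu⟩ := PySem.List.mem_pyRange_one.1 hc
    refine ⟨hcl, fun e he => ?_⟩
    have := hwide e he
    omega)]
  rw [pvBInner_eq_all]
  congr 1
  rw [Bool.eq_iff_iff, List.all_eq_true, List.all_eq_true]
  have hlen : ∀ i, (hi : i < pattern.length) → (pattern.headD "").toList.length ≤ (pattern[i]).toList.length :=
    fun i hi => hwide _ (List.getElem_mem hi)
  constructor
  · intro hA k hk
    obtain ⟨hk0, hk1⟩ := PySem.List.mem_pyRange_one.1 hk
    rw [PySem.List.len_eq] at hk1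
    simp only [beq_iff_eq]
    have hia : 0 ≤ r - 1 - k := by omega
    have hib : r - 1 - k < (pattern.length : Int) := by omega
    have hic : 0 ≤ r + k := by omega
    have hid : r + k < (pattern.length : Int) := by omega
    rw [PySem.List.pyGetD_eq_getElem pattern "" hia hib, PySem.List.pyGetD_eq_getElem pattern "" hic hid]
    apply String.toList_inj.mp
    rw [PySem.Str.toList_slice, PySem.Str.toList_slice]
    show PySem.List.slice _ _ _ = PySem.List.slice _ _ _
    rw [PySem.List.slice_to_natCast, PySem.List.slice_to_natCast]
    have hl1 := hlen ((r-1-k).toNat) (by omega)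
    have hl2 := hlen ((r+k).toNat) (by omega)
    apply List.ext_getElem (by simp only [List.length_take]; omega)
    intro i hi1 hi2
    have hiw : i < (pattern.headD "").toList.length := by
      simp only [List.length_take] at hi1; omega
    simp only [List.getElem_take]
    have hBc := hA (i : Int) (PySem.List.mem_pyRange_one.2 ⟨by omega, by omega⟩)
    rw [pvColB, decide_eq_true_iff] at hBc
    have := hBc k.toNat (by omega)
    rw [List.getD_eq_getElem pattern _ (by omega : r.toNat - 1 - k.toNat < pattern.length),
      List.getD_eq_getElem pattern _ (by omega : r.toNat + k.toNat < pattern.length)] at this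
    rw [List.getD_eq_getElem _ _ (by have := hlen (r.toNat - 1 - k.toNat) (by omega); simp only [Int.toNat_natCast]; omega),
      List.getD_eq_getElem _ _ (by have := hlen (r.toNat + k.toNat) (by omega); simp only [Int.toNat_natCast]; omega)] at this
    have hix1 : (r - 1 - k).toNat = r.toNat - 1 - k.toNat := by omega
    have hix2 : (r + k).toNat = r.toNat + k.toNat := by omega
    simp only [hix1, hix2, Int.toNat_natCast] at this ⊢
    exact this
  · intro hB c hc
    obtain ⟨hc0, hc1⟩ := PySem.List.mem_pyRange_one.1 hc
    rw [pvColB, decide_eq_true_iff]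
    intro k hk
    have hs := hB (k : Int) (PySem.List.mem_pyRange_one.2 ⟨by omega, by rw [PySem.List.len_eq]; omega⟩)
    simp only [beq_iff_eq] at hs
    have hia : 0 ≤ r - 1 - (k : Int) := by omega
    have hib : r - 1 - (k : Int) < (pattern.length : Int) := by omega
    have hic : 0 ≤ r + (k : Int) := by omega
    have hid : r + (k : Int) < (pattern.length : Int) := by omega
    rw [PySem.List.pyGetD_eq_getElem pattern "" hia hib, PySem.List.pyGetD_eq_getElem pattern "" hic hid] at hs
    have hls := congrArg String.toList hs
    rw [PySem.Str.toList_slice, PySem.Str.toList_slice] at hls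
    have hls' : List.take (pattern.headD "").toList.length (pattern[(r - 1 - (k:Int)).toNat]).toList
        = List.take (pattern.headD "").toList.length (pattern[(r + (k:Int)).toNat]).toList := by
      rw [← PySem.List.slice_to_natCast, ← PySem.List.slice_to_natCast]
      exact hls
    have hpt := congrArg (fun l => l.getD c.toNat ' ') hls'
    have hl1 := hlen ((r - 1 - (k:Int)).toNat) (by omega)
    have hl2 := hlen ((r + (k:Int)).toNat) (by omega)
    have hcw : c.toNat < (pattern.headD "").toList.length := by omega
    simp only at hpt
    rw [List.getD_eq_getElem _ _ (by simp only [List.length_take]; omega),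
      List.getD_eq_getElem _ _ (by simp only [List.length_take]; omega)] at hpt
    simp only [List.getElem_take] at hpt
    rw [show r.toNat - 1 - k = (r - 1 - (k : Int)).toNat by omega,
      show r.toNat + k = (r + (k : Int)).toNat by omega,
      List.getD_eq_getElem pattern _ (by omega : (r - 1 - (k : Int)).toNat < pattern.length),
      List.getD_eq_getElem pattern _ (by omega : (r + (k : Int)).toNat < pattern.length),
      List.getD_eq_getElem _ _ (by omega : c.toNat < (pattern[(r - 1 - (k:Int)).toNat]).toList.length),
      List.getD_eq_getElem _ _ (by omega : c.toNat < (pattern[(r + (k:Int)).toNat]).toList.length)]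
    exact hpt

-- both inner checks refuted in column 0: A's candidate check is 'some false', B's is 'false'
lemma pv_inner_false (pattern : List String) (r : Int)
    (hne : ∀ s ∈ pattern, 1 ≤ s.toList.length)
    (hmis : ∀ r' < pattern.length, 1 ≤ r' → ∃ k < min r' (pattern.length - r'),
      (pattern.getD (r' - 1 - k) "").toList.getD 0 ' ' ≠ (pattern.getD (r' + k) "").toList.getD 0 ' ')
    (h1 : 1 ≤ r) (h2 : r < pattern.length) :
    pvAInner pattern r (PySem.List.pyRange 0 (PySem.Str.len (PySem.List.pyGetD pattern 0 "")) 1)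
      = some false
    ∧ pvBInner pattern r (PySem.Str.len (PySem.List.pyGetD pattern 0 ""))
        (PySem.List.pyRange 0 (min r (PySem.List.len pattern - r)) 1) = false := by
  have hn0 : pattern ≠ [] := by intro hp; rw [hp] at h2; simp at h2; omega
  have hhead : PySem.List.pyGetD pattern 0 "" = pattern.headD "" := by
    rw [PySem.List.pyGetD_zero]
    cases pattern with
    | nil => rfl
    | cons x xs => rfl
  have hw : PySem.Str.len (PySem.List.pyGetD pattern 0 "") = (((pattern.headD "").toList.length : Nat) : Int) := by
    rw [hhead]; rfl
  have hw1 : 1 ≤ (pattern.headD "").toList.length := by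
    apply hne
    cases pattern with
    | nil => exact absurd rfl hn0
    | cons x xs => exact List.mem_cons_self
  obtain ⟨k, hk, hkne⟩ := hmis r.toNat (by omega) (by omega)
  have hia : 0 ≤ r - 1 - (k : Int) := by omega
  have hib : r - 1 - (k : Int) < (pattern.length : Int) := by omega
  have hic : 0 ≤ r + (k : Int) := by omega
  have hid : r + (k : Int) < (pattern.length : Int) := by omega
  constructor
  · -- A side: the scan of the first column already fails
    rw [hw, PySem.List.pyRange_one_cons (by omega : (0:Int) < ((pattern.headD "").toList.length : Int)),
      pvAInner_cons pattern r 0 _ (by omega) (fun e he => by have := hne e he; omega) h1 h2]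
    have hcB : pvColB pattern r 0 = false := by
      rw [pvColB]
      apply decide_eq_false
      intro hall
      exact hkne (by simpa using hall k hk)
    rw [hcB]
    simp only [Bool.false_eq_true, if_false]
  · -- B side: the same pair of rows differs in its first character
    rw [pvBInner_eq_all]
    apply List.all_eq_false.2
    refine ⟨(k : Int), PySem.List.mem_pyRange_one.2 ⟨by omega, by rw [PySem.List.len_eq]; omega⟩, ?_⟩
    simp only [beq_iff_eq]
    intro heq
    apply hkne
    have hls := congrArg String.toList heq
    rw [PySem.List.pyGetD_eq_getElem pattern "" hia hib, PySem.List.pyGetD_eq_getElem pattern "" hic hid,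
      hw, PySem.Str.toList_slice, PySem.Str.toList_slice] at hls
    have hls' : List.take (pattern.headD "").toList.length (pattern[(r - 1 - (k:Int)).toNat]).toList
        = List.take (pattern.headD "").toList.length (pattern[(r + (k:Int)).toNat]).toList := by
      rw [← PySem.List.slice_to_natCast, ← PySem.List.slice_to_natCast]
      exact hls
    have hpt := congrArg (fun l => l.getD 0 ' ') hls'
    have hl1 : 1 ≤ (pattern[(r - 1 - (k:Int)).toNat]).toList.length :=
      hne _ (List.getElem_mem (by omega))
    have hl2 : 1 ≤ (pattern[(r + (k:Int)).toNat]).toList.length :=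
      hne _ (List.getElem_mem (by omega))
    simp only at hpt
    rw [List.getD_eq_getElem _ _ (by simp only [List.length_take]; omega),
      List.getD_eq_getElem _ _ (by simp only [List.length_take]; omega)] at hpt
    simp only [List.getElem_take] at hpt
    rw [show r.toNat - 1 - k = (r - 1 - (k : Int)).toNat by omega,
      show r.toNat + k = (r + (k : Int)).toNat by omega,
      List.getD_eq_getElem pattern _ (by omega : (r - 1 - (k : Int)).toNat < pattern.length),
      List.getD_eq_getElem pattern _ (by omega : (r + (k : Int)).toNat < pattern.length),
      List.getD_eq_getElem _ _ (by omega : 0 < (pattern[(r - 1 - (k:Int)).toNat]).toList.length),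
      List.getD_eq_getElem _ _ (by omega : 0 < (pattern[(r + (k:Int)).toNat]).toList.length)]
    exact hpt

-- outer loops agree, given that the candidate checks agree
lemma pv_outer_eq (pattern : List String) (already : Int)
    (hinner : ∀ r : Int, 1 ≤ r → r < (pattern.length : Int) →
      pvAInner pattern r (PySem.List.pyRange 0 (PySem.Str.len (PySem.List.pyGetD pattern 0 "")) 1)
        = some (pvBInner pattern r (PySem.Str.len (PySem.List.pyGetD pattern 0 ""))
            (PySem.List.pyRange 0 (min r (PySem.List.len pattern - r)) 1))) :
    ∀ (rs : List Int) (row : Int) (m : Bool), (∀ r ∈ rs, 1 ≤ r ∧ r < (pattern.length : Int)) →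
      pvAOuter pattern already rs row m = some (pvBOuter pattern already rs row m) := by
  intro rs
  induction rs with
  | nil => intro row m _; rfl
  | cons r rs ih =>
    intro row m hmem
    obtain ⟨hr1, hr2⟩ := hmem r (by simp)
    rw [pvAOuter, pvBOuter, hinner r hr1 hr2]
    dsimp only
    by_cases hb1 : (already == 0 && pvBInner pattern r (PySem.Str.len (PySem.List.pyGetD pattern 0 ""))
        (PySem.List.pyRange 0 (min r (PySem.List.len pattern - r)) 1)) = true
    · rw [if_pos hb1, if_pos hb1]
    · rw [if_neg hb1, if_neg hb1]
      by_cases hb2 : (pvBInner pattern r (PySem.Str.len (PySem.List.pyGetD pattern 0 ""))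
          (PySem.List.pyRange 0 (min r (PySem.List.len pattern - r)) 1) && r != already) = true
      · rw [if_pos hb2, if_pos hb2]
      · rw [if_neg hb2, if_neg hb2]
        exact ih r _ (fun d hd => hmem d (List.mem_cons_of_mem _ hd))

-- ===== VERDICT (by name: the statement is the Claim_ definition above) =====
theorem find_row_symmetry_spec : Claim_equal_find_row_symmetry := by
  intro pattern already _hdom hpre
  obtain ⟨hlen2, hd⟩ := hpre
  have hmemrs : ∀ r ∈ PySem.List.pyRange 1 (PySem.List.len pattern) 1, 1 ≤ r ∧ r < (pattern.length : Int) := by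
    intro r hr
    rw [PySem.List.len_eq] at hr
    have := (PySem.List.mem_pyRange_one).1 hr
    omega
  unfold Spec_find_row_symmetry find_row_symmetry find_row_symmetry_alt
  rcases hd with hwide | ⟨hne, hmis⟩
  · rw [pv_outer_eq pattern already (fun r h1 h2 => pv_inner_eq pattern r hwide h1 h2) _ 0 true hmemrs]
  · rw [pv_outer_eq pattern already (fun r h1 h2 => by
      obtain ⟨ha, hb⟩ := pv_inner_false pattern r hne hmis h1 h2
      rw [ha, hb]) _ 0 true hmemrs]
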